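-- pv_equiv track=rewrite | github.com/sharky564/Codeforces | CodeForces Problems 0501-0600/CodeForces Problem 0520B.py | mincount
-- ===== SOURCE A (Python) =====
-- def mincount(n, m):
--     count = 0
--     if n > m:
--         count = n - m
--     elif n < m:
--         if m % 2 == 0:
--             count = mincount(n, m // 2) + 1
--         if m % 2 == 1:
--             count = mincount(n, m + 1) + 1
--     return count
-- ===== SOURCE B (Python) =====
-- def mincount(n, m):
--     count = 0
--     while m > n:
--         if m % 2 == 0:
--             m //= 2
--         else:
--             m += 1
--         count += 1
--     return count + (n - m)
-- ===== Notes on version B (the rewrite author's own statement) =====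
-- stated objective: simpler
-- what changed: Replaces A's recursion (with two sequential if-assignments per step) by an iterative while-loop with an explicit counter that adds n - m once the loop exits.
import Mathlib
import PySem

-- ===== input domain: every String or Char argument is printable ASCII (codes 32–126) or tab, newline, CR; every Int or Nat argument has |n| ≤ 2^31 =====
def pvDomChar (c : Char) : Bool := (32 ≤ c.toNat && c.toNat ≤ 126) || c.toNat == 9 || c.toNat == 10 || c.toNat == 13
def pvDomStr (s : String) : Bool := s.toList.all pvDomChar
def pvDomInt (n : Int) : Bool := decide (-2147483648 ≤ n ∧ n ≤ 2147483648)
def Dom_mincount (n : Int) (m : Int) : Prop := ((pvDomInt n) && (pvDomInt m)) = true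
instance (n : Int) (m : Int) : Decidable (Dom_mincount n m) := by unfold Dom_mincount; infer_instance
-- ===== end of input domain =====

-- B replaces A's recursion by an iterative while-loop with a counter; objective: simpler.


-- ===== PORT A =====
-- A's recursion, step for step; fuel only makes the recursion total (Pre_ keeps inputs
-- where Python terminates; there 200 fuel is more than the ≤ ~70 recursion depth).
def mincountF : Nat → Int → Int → Int
  | 0, _, _ => 0
  | fuel + 1, n, m =>
    let count : Int := 0
    if n > m then
      n - m
    else if n < m then
      let count := if PySem.Int.mod m 2 = 0 then mincountF fuel n (PySem.Int.floordiv m 2) + 1 else count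
      let count := if PySem.Int.mod m 2 = 1 then mincountF fuel n (m + 1) + 1 else count
      count
    else count

def mincount (n : Int) (m : Int) : Int := mincountF 200 n m

-- ===== PORT B =====
-- B's while-loop as a tail-recursive helper carrying the counter (fuel for totality only).
def mincountGo : Nat → Int → Int → Int → Int
  | 0, _, _, count => count
  | fuel + 1, n, m, count =>
    if m > n then
      if PySem.Int.mod m 2 = 0 then mincountGo fuel n (PySem.Int.floordiv m 2) (count + 1)
      else mincountGo fuel n (m + 1) (count + 1)
    else count + (n - m)

def mincount_alt (n : Int) (m : Int) : Int := mincountGo 200 n m 0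

-- ===== PRECONDITION & SPEC =====
-- Python A recurses forever (RecursionError) whenever n ≤ 0 < m-chain, i.e. unless n ≥ 1 or m ≤ n;
-- Pre_ excludes exactly those raising inputs (B's loop also diverges there).
def Pre_mincount (n : Int) (m : Int) : Prop := 1 ≤ n ∨ m ≤ n
instance (n : Int) (m : Int) : Decidable (Pre_mincount n m) := by unfold Pre_mincount; infer_instance
def pvWitness_mincount : Int × Int := (3, 10)

def Spec_mincount (n : Int) (m : Int) (out : Int) : Prop := out = mincount_alt n m
instance (n : Int) (m : Int) (out : Int) : Decidable (Spec_mincount n m out) := by unfold Spec_mincount; infer_instance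

-- ===== CLAIM (what is proved, stated in full; the proofs are below) =====
def Claim_equal_mincount : Prop := ∀ (n : Int) (m : Int), Dom_mincount n m → Pre_mincount n m → Spec_mincount n m (mincount n m)

-- ===== LEMMAS AND PROOFS =====

-- accumulator abstraction for B's tail recursion
theorem mincountGo_acc (fuel : Nat) (n m c : Int) :
    mincountGo fuel n m c = c + mincountGo fuel n m 0 := by
  induction fuel generalizing m c with
  | zero => simp [mincountGo]
  | succ f ih =>
    simp only [mincountGo]
    split_ifs with h1 h2
    · rw [ih _ (c + 1), ih _ (0 + 1)]; ring
    · rw [ih _ (c + 1), ih _ (0 + 1)]; ring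
    · ring

theorem mincountF_eq_go (fuel : Nat) (n m : Int) :
    mincountF fuel n m = mincountGo fuel n m 0 := by
  induction fuel generalizing m with
  | zero => simp [mincountF, mincountGo]
  | succ f ih =>
    simp only [mincountF, mincountGo]
    rcases lt_trichotomy n m with h | h | h
    · rw [if_neg (by omega : ¬ n > m), if_pos h, if_pos (by omega : m > n)]
      have hpar : PySem.Int.mod m 2 = 0 ∨ PySem.Int.mod m 2 = 1 := by
        have h2 : m.fmod 2 = m % 2 := by
          rw [Int.fmod_eq_emod]; simp
        simp only [PySem.Int.mod, h2]; omega
      rcases hpar with hm | hm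
      · rw [if_pos hm, if_neg (by rw [hm]; decide : ¬ PySem.Int.mod m 2 = (1 : Int)),
            if_pos hm, ih, mincountGo_acc f n _ (0 + 1)]
        ring
      · rw [if_neg (by rw [hm]; decide : ¬ PySem.Int.mod m 2 = (0 : Int)), if_pos hm,
            if_neg (by rw [hm]; decide : ¬ PySem.Int.mod m 2 = (0 : Int)),
            ih, mincountGo_acc f n _ (0 + 1)]
        ring
    · rw [if_neg (by omega : ¬ n > m), if_neg (by omega : ¬ n < m), if_neg (by omega : ¬ m > n)]
      omega
    · rw [if_pos h, if_neg (by omega : ¬ m > n)]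
      ring

-- ===== VERDICT (by name: the statement is the Claim_ definition above) =====
theorem mincount_spec : Claim_equal_mincount := by
  intro n m _ _
  unfold Spec_mincount mincount mincount_alt
  exact mincountF_eq_go 200 n m
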